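-- pv_equiv track=rewrite | github.com/gosch/Katas-in-python | 2019/september/increaseNumberRoundness.py | increaseNumberRoundness
-- ===== SOURCE A (Python) =====
-- def increaseNumberRoundness(n):
--     c = 0
--     ns = str(n)
--     e = len(ns)
--     for i in range(e):
--         if ns[i] == '0':
--             for j in range(i+1, e):
--                 if ns[j] != '0':
--                     return True
--             break
--     return False
-- ===== SOURCE B (Python) =====
-- def increaseNumberRoundness(n):
--     return '0' in str(n).rstrip('0')
-- ===== Notes on version B (the rewrite author's own statement) =====
-- stated objective: simpler
-- what changed: Replaced the nested index loops with break/early-return by a one-liner: strip trailing zeros with rstrip('0') and test whether a '0' remains.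
import Mathlib
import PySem

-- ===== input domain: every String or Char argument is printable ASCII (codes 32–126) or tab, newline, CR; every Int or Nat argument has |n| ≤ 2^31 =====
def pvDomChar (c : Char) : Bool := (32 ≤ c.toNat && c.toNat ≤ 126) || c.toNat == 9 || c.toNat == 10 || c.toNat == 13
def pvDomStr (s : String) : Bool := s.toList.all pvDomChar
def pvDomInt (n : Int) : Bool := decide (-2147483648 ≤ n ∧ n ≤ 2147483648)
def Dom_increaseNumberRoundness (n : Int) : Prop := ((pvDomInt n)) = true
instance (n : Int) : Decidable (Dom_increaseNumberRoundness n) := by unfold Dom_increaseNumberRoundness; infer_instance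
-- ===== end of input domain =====

-- B replaces A's nested index loops by rstrip('0') + membership test; objective: simpler.
-- ===== PORT A =====
-- outer loop 'for i in range(e)': scan chars in order; on the first '0' run the inner scan
-- (the 'break' after the inner loop means the outer loop's result is the inner loop's result)
def pvInnerA : List Char → Bool
  | [] => false
  | c :: rest => if c ≠ '0' then true else pvInnerA rest

def pvLoopA : List Char → Bool
  | [] => false
  | c :: rest => if c = '0' then pvInnerA rest else pvLoopA rest

def increaseNumberRoundness (n : Int) : Bool :=
  pvLoopA (PySem.Int.toChars n)

-- ===== PORT B =====
-- hand-port of s.rstrip('0') (exact: drop trailing '0' chars) and of "'0' in s"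
-- (exact here: the pattern is a single character, so substring membership = char membership)
def pvRstrip0 (s : List Char) : List Char :=
  ((s.reverse.dropWhile (fun c => c == '0'))).reverse

def increaseNumberRoundness_alt (n : Int) : Bool :=
  (pvRstrip0 (PySem.Int.toChars n)).contains '0' 

-- ===== PRECONDITION & SPEC =====
def Spec_increaseNumberRoundness (n : Int) (out : Bool) : Prop := out = increaseNumberRoundness_alt n
instance (n : Int) (out : Bool) : Decidable (Spec_increaseNumberRoundness n out) := by unfold Spec_increaseNumberRoundness; infer_instance

-- ===== CLAIM (what is proved, stated in full; the proofs are below) =====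
def Claim_equal_increaseNumberRoundness : Prop := ∀ (n : Int), Dom_increaseNumberRoundness n → Spec_increaseNumberRoundness n (increaseNumberRoundness n)

-- ===== LEMMAS AND PROOFS =====

lemma pvInnerA_eq_any (l : List Char) : pvInnerA l = l.any (fun c => c ≠ '0') := by
  induction l with
  | nil => rfl
  | cons c rest ih => simp [pvInnerA, ih]

lemma pvLoopA_append_zero (ys : List Char) : pvLoopA (ys ++ ['0']) = pvLoopA ys := by
  induction ys with
  | nil => simp [pvLoopA, pvInnerA]
  | cons c ys ih =>
    by_cases h : c = '0'
    · simp [pvLoopA, h, pvInnerA_eq_any]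
    · simp [pvLoopA, h, ih]

lemma pvLoopA_append_ne (ys : List Char) (c : Char) (hc : c ≠ '0') :
    pvLoopA (ys ++ [c]) = ys.contains '0' := by
  induction ys with
  | nil => simp [pvLoopA, pvInnerA, hc]
  | cons d ys ih =>
    by_cases h : d = '0'
    · simp [pvLoopA, h, pvInnerA_eq_any, List.any_append, hc]
    · simp [pvLoopA, h, ih, Ne.symm h]

lemma pvLoopA_eq_rstrip (l : List Char) : pvLoopA l = (pvRstrip0 l).contains '0' := by
  induction l using List.reverseRecOn with
  | nil => rfl
  | append_singleton ys c ih =>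
    by_cases h : c = '0'
    · subst h
      rw [pvLoopA_append_zero, ih]
      simp [pvRstrip0]
    · rw [pvLoopA_append_ne ys c h]
      have hdrop : List.dropWhile (fun c => c == '0') (c :: ys.reverse) = c :: ys.reverse := by
        simp [List.dropWhile_cons, h]
      simp [pvRstrip0, hdrop, List.contains_eq_mem, Ne.symm h]

-- ===== VERDICT (by name: the statement is the Claim_ definition above) =====
theorem increaseNumberRoundness_spec : Claim_equal_increaseNumberRoundness := by
  intro n _
  unfold Spec_increaseNumberRoundness increaseNumberRoundness increaseNumberRoundness_alt
  exact pvLoopA_eq_rstrip _
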